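-- pv_equiv track=rewrite | github.com/nguyenngochuy91/companyQuestions | facebook/amazingNumber.py | getAmazingNumberNaive
-- ===== SOURCE A (Python) =====
-- def getAmazingNumberNaive(arr):
--     size = len(arr)
--     maxCount = 0
--     for i in range(size):
--         starting =i
--         count = 0
--         for j in range(size):
-- #            print (starting,j)
--             if j>=arr[starting%size]:
-- #                print ("index:",j, "num:",arr[starting%size])
--                 count+=1
--             starting+=1
--         maxCount= max(maxCount,count)
--     return maxCount
-- ===== SOURCE B (Python) =====
-- def getAmazingNumberNaive(arr):
--     n = len(arr)
--     if n == 0: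
--         return 0
--     # difference array over rotation offsets: element k (value v) is "amazing"
--     # in rotation i exactly when (k - i) % n >= v; that is a circular interval of i's.
--     diff = [0] * (n + 1)
--     for k in range(n):
--         v = arr[k]
--         if v <= 0:
--             diff[0] += 1
--             diff[n] -= 1
--         elif v < n:
--             lo = (k + 1) % n
--             hi = (k - v) % n
--             if lo <= hi:
--                 diff[lo] += 1
--                 diff[hi + 1] -= 1
--             else:
--                 diff[0] += 1
--                 diff[hi + 1] -= 1
--                 diff[lo] += 1
--                 diff[n] -= 1
--     best = 0
--     cur = 0
--     for i in range(n):
--         cur += diff[i]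
--         if cur > best:
--             best = cur
--     return best
-- ===== Notes on version B (the rewrite author's own statement) =====
-- stated objective: faster
-- what changed: A re-counts amazing positions for every rotation with a nested O(n^2) scan; B computes, for each element, the contiguous (circular) interval of rotation starts in which it is amazing, accumulates those intervals in a difference array, and takes the max of its prefix sums in O(n).
import Mathlib
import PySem

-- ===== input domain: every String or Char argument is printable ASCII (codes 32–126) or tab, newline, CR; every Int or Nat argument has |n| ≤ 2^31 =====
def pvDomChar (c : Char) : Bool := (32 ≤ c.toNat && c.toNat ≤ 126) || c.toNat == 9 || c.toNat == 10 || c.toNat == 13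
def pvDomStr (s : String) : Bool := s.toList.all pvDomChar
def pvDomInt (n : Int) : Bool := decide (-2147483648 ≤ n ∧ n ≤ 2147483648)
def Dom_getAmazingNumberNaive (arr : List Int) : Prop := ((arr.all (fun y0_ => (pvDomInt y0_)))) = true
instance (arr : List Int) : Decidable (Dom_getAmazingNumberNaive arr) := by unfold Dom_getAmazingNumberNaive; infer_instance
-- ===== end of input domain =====

-- B replaces A's O(n^2) rotation-by-rotation scan by an O(n) difference array over the
-- circular interval of rotations in which each element is "amazing", then a prefix-sum max.

-- ===== PORT A =====
-- arr[starting % size] is always in range (0 ≤ starting % size < size = len arr), so pyGetD is exact here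
def getAmazingNumberNaive (arr : List Int) : Int :=
  let size : Int := arr.length
  (PySem.List.pyRange 0 size 1).foldl
    (fun maxCount i =>
      let r := (PySem.List.pyRange 0 size 1).foldl
        (fun (sc : Int × Int) j =>
          (sc.1 + 1,
           if PySem.List.pyGetD arr (PySem.Int.mod sc.1 size) 0 ≤ j then sc.2 + 1 else sc.2))
        (i, 0)
      max maxCount r.2)
    0

-- ===== PORT B =====
-- all diff indices lie in [0, n] on a list of length n+1, so pyGetD/pySetD are exact here
-- body of B's first loop: add element k's circular interval of rotations to the difference array
def altBody (arr : List Int) (d : List Int) (k : Int) : List Int :=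
  let n : Int := arr.length
  let v := PySem.List.pyGetD arr k 0
  if v ≤ 0 then
    let d := PySem.List.pySetD d 0 (PySem.List.pyGetD d 0 0 + 1)
    PySem.List.pySetD d n (PySem.List.pyGetD d n 0 - 1)
  else if v < n then
    let lo := PySem.Int.mod (k + 1) n
    let hi := PySem.Int.mod (k - v) n
    if lo ≤ hi then
      let d := PySem.List.pySetD d lo (PySem.List.pyGetD d lo 0 + 1)
      PySem.List.pySetD d (hi + 1) (PySem.List.pyGetD d (hi + 1) 0 - 1)
    else
      let d := PySem.List.pySetD d 0 (PySem.List.pyGetD d 0 0 + 1)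
      let d := PySem.List.pySetD d (hi + 1) (PySem.List.pyGetD d (hi + 1) 0 - 1)
      let d := PySem.List.pySetD d lo (PySem.List.pyGetD d lo 0 + 1)
      PySem.List.pySetD d n (PySem.List.pyGetD d n 0 - 1)
  else d

-- body of B's second loop: running prefix sum (cur) and running best
def altScanBody (diff : List Int) (bc : Int × Int) (i : Int) : Int × Int :=
  let cur := bc.2 + PySem.List.pyGetD diff i 0
  (if cur > bc.1 then cur else bc.1, cur)

def getAmazingNumberNaive_alt (arr : List Int) : Int :=
  let n : Int := arr.length
  if n = 0 then 0
  else
    let diff := (PySem.List.pyRange 0 n 1).foldl (altBody arr) (List.replicate (arr.length + 1) 0)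
    ((PySem.List.pyRange 0 n 1).foldl (altScanBody diff) (0, 0)).1

-- ===== PRECONDITION & SPEC =====
def Spec_getAmazingNumberNaive (arr : List Int) (out : Int) : Prop := out = getAmazingNumberNaive_alt arr
instance (arr : List Int) (out : Int) : Decidable (Spec_getAmazingNumberNaive arr out) := by unfold Spec_getAmazingNumberNaive; infer_instance

-- ===== CLAIM (what is proved, stated in full; the proofs are below) =====
def Claim_equal_getAmazingNumberNaive : Prop := ∀ (arr : List Int), Dom_getAmazingNumberNaive arr → Spec_getAmazingNumberNaive arr (getAmazingNumberNaive arr)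

-- ===== LEMMAS AND PROOFS =====

-- indicator: in the rotation starting at s, position j holds an amazing element (A's view)
def indAf (arr : List Int) (s : Int) (j : Nat) : Int :=
  if PySem.List.pyGetD arr (PySem.Int.mod (s + (j : Int)) (arr.length : Int)) 0 ≤ (j : Int) then 1 else 0

-- A's count for the rotation starting at i
def AcF (arr : List Int) (i : Int) : Int := ∑ j ∈ Finset.range arr.length, indAf arr i j

-- indicator: element k is amazing in the rotation starting at i (B's view)
def indKf (arr : List Int) (k : Nat) (i : Int) : Int :=
  if arr.getD k 0 ≤ PySem.Int.mod ((k : Int) - i) (arr.length : Int) then 1 else 0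

-- contribution of element k to B's difference array at slot t
def deltaB (arr : List Int) (k t : Nat) : Int :=
  let n : Int := arr.length
  let v := arr.getD k 0
  if v ≤ 0 then (if (t : Int) = 0 then 1 else 0) + (if (t : Int) = n then -1 else 0)
  else if v < n then
    let lo := PySem.Int.mod ((k : Int) + 1) n
    let hi := PySem.Int.mod ((k : Int) - v) n
    if lo ≤ hi then (if (t : Int) = lo then 1 else 0) + (if (t : Int) = hi + 1 then -1 else 0)
    else (if (t : Int) = 0 then 1 else 0) + (if (t : Int) = hi + 1 then -1 else 0)
       + (if (t : Int) = lo then 1 else 0) + (if (t : Int) = n then -1 else 0)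
  else 0

-- cur's value after processing slot i of B's prefix-sum loop
def PrefI (DL : List Int) (i : Int) : Int := ∑ t ∈ Finset.range (i.toNat + 1), DL.getD t 0

lemma hmod (a n : Int) (hn : 0 < n) (h1 : -n ≤ a) (h2 : a ≤ n) :
    PySem.Int.mod a n = if a = n then 0 else if 0 ≤ a then a else a + n := by
  rw [PySem.Int.mod_eq_emod_of_pos hn]
  by_cases hp : a = n
  · subst hp; simp
  · by_cases h0 : 0 ≤ a
    · rw [Int.emod_eq_of_lt h0 (by omega)]; simp [hp, h0]
    · have hr : a % n = (a + n) % n := (Int.add_emod_right a n).symm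
      rw [hr, Int.emod_eq_of_lt (by omega) (by omega)]; simp [hp, h0]

lemma hmod2 (a n : Int) (hn : 0 < n) (h1 : 0 ≤ a) (h2 : a < 2 * n) :
    PySem.Int.mod a n = if a < n then a else a - n := by
  rw [PySem.Int.mod_eq_emod_of_pos hn]
  by_cases h : a < n
  · simp [h, Int.emod_eq_of_lt h1 h]
  · have hr : a % n = (a - n) % n := by
      have := Int.add_emod_right (a - n) n
      simpa using this.symm
    rw [hr, Int.emod_eq_of_lt (by omega) (by omega)]
    simp [h]

lemma getD_set (xs : List Int) (a t : Nat) (v : Int) (ha : a < xs.length) :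
    (xs.set a v).getD t 0 = if t = a then v else xs.getD t 0 := by
  by_cases h : t = a
  · subst h
    simp [List.getD, ha]
  · simp only [List.getD, List.getElem?_set]
    rw [if_neg (by omega : ¬ a = t), if_neg h]

lemma sum_ind (m : Nat) (a c : Int) :
    (∑ t ∈ Finset.range m, if (t : Int) = a then c else 0)
      = if 0 ≤ a ∧ a < (m : Int) then c else 0 := by
  induction m with
  | zero =>
    rw [Finset.sum_range_zero]
    have h : ¬(0 ≤ a ∧ a < ((0:Nat):Int)) := by push_cast; omega
    simp [h]
  | succ m ih =>
    rw [Finset.sum_range_succ, ih]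
    split_ifs <;> push_cast at * <;> omega


lemma pyGetD_toNat (xs : List Int) (a : Int) (h0 : 0 ≤ a) :
    PySem.List.pyGetD xs a 0 = xs.getD a.toNat 0 := by
  conv_lhs => rw [← Int.toNat_of_nonneg h0]
  exact PySem.List.pyGetD_natCast xs a.toNat 0

-- read-modify-write at Int index a: add c to slot a
lemma getD_bump (xs : List Int) (a c : Int) (h0 : 0 ≤ a) (ha : a < xs.length) (t : Nat) :
    (PySem.List.pySetD xs a (PySem.List.pyGetD xs a 0 + c)).getD t 0
      = xs.getD t 0 + (if (t : Int) = a then c else 0) := by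
  rw [PySem.List.pySetD_of_nonneg _ _ h0, pyGetD_toNat xs a h0, getD_set _ _ _ _ (by omega)]
  by_cases hc : t = a.toNat
  · subst hc; rw [if_pos rfl, if_pos (by omega)]
  · rw [if_neg hc, if_neg (by omega), add_zero]

lemma getD_drop (xs : List Int) (a : Int) (h0 : 0 ≤ a) (ha : a < xs.length) (t : Nat) :
    (PySem.List.pySetD xs a (PySem.List.pyGetD xs a 0 - 1)).getD t 0
      = xs.getD t 0 + (if (t : Int) = a then -1 else 0) := by
  have := getD_bump xs a (-1) h0 ha t
  rw [← this]; ring_nf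

lemma innerA (arr : List Int) (m : Nat) (s c : Int) :
    (PySem.List.pyRange 0 (m : Int) 1).foldl
      (fun (sc : Int × Int) j =>
        (sc.1 + 1,
         if PySem.List.pyGetD arr (PySem.Int.mod sc.1 (arr.length : Int)) 0 ≤ j then sc.2 + 1 else sc.2))
      (s, c)
    = (s + m, c + ∑ j ∈ Finset.range m, indAf arr s j) := by
  induction m with
  | zero =>
    rw [PySem.List.pyRange_one_eq_nil (by omega)]
    simp
  | succ m ih =>
    have hc : ((m + 1 : Nat) : Int) = (m : Int) + 1 := by push_cast; ring
    rw [hc, PySem.List.pyRange_one_succ_right (by omega), List.foldl_append, ih]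
    simp only [List.foldl_cons, List.foldl_nil, Finset.sum_range_succ]
    unfold indAf
    split_ifs <;> simp only [Prod.mk.injEq] <;> constructor <;> push_cast <;> ring

lemma portA_eq (arr : List Int) :
    getAmazingNumberNaive arr
      = (PySem.List.pyRange 0 (arr.length : Int) 1).foldl (fun M i => max M (AcF arr i)) 0 := by
  unfold getAmazingNumberNaive
  dsimp only
  refine PySem.List.foldl_congr_mem _ _ _ _ ?_
  intro acc i _
  rw [innerA arr arr.length i 0]
  simp [AcF]

lemma stepUpd (arr D : List Int) (k : Nat) (hn : 0 < arr.length) (hk : k < arr.length)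
    (hD : D.length = arr.length + 1) :
    (altBody arr D (k : Int)).length = arr.length + 1 ∧
    ∀ t : Nat, (altBody arr D (k : Int)).getD t 0 = D.getD t 0 + deltaB arr k t := by
  have hN : (0 : Int) < (arr.length : Int) := by exact_mod_cast hn
  have hDl : (D.length : Int) = (arr.length : Int) + 1 := by exact_mod_cast hD
  have hlo0 : 0 ≤ PySem.Int.mod ((k : Int) + 1) (arr.length : Int) := by
    rw [PySem.Int.mod_eq_emod_of_pos hN]; exact Int.emod_nonneg _ (by omega)
  have hloN : PySem.Int.mod ((k : Int) + 1) (arr.length : Int) < (arr.length : Int) := by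
    rw [PySem.Int.mod_eq_emod_of_pos hN]; exact Int.emod_lt_of_pos _ hN
  have hhi0 : 0 ≤ PySem.Int.mod ((k : Int) - arr.getD k 0) (arr.length : Int) := by
    rw [PySem.Int.mod_eq_emod_of_pos hN]; exact Int.emod_nonneg _ (by omega)
  have hhiN : PySem.Int.mod ((k : Int) - arr.getD k 0) (arr.length : Int) < (arr.length : Int) := by
    rw [PySem.Int.mod_eq_emod_of_pos hN]; exact Int.emod_lt_of_pos _ hN
  unfold altBody deltaB
  dsimp only
  rw [PySem.List.pyGetD_natCast]
  refine ⟨?_, fun t => ?_⟩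
  · split_ifs <;> simp [PySem.List.length_pySetD, hD]
  · by_cases h1 : arr.getD k 0 ≤ 0
    · rw [if_pos h1, if_pos h1,
          getD_drop _ _ (by omega) (by simp only [PySem.List.length_pySetD]; omega) t,
          getD_bump _ _ _ (by omega) (by omega) t]
      ring
    · rw [if_neg h1, if_neg h1]
      by_cases h2 : arr.getD k 0 < (arr.length : Int)
      · rw [if_pos h2, if_pos h2]
        by_cases h3 : PySem.Int.mod ((k : Int) + 1) (arr.length : Int)
            ≤ PySem.Int.mod ((k : Int) - arr.getD k 0) (arr.length : Int)
        · rw [if_pos h3, if_pos h3,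
              getD_drop _ _ (by omega) (by simp only [PySem.List.length_pySetD]; omega) t,
              getD_bump _ _ _ (by omega) (by omega) t]
          ring
        · rw [if_neg h3, if_neg h3,
              getD_drop _ _ (by omega) (by simp only [PySem.List.length_pySetD]; omega) t,
              getD_bump _ _ _ (by omega) (by simp only [PySem.List.length_pySetD]; omega) t,
              getD_drop _ _ (by omega) (by simp only [PySem.List.length_pySetD]; omega) t,
              getD_bump _ _ _ (by omega) (by omega) t]
          ring
      · rw [if_neg h2, if_neg h2]
        ring

lemma diffInv (arr : List Int) (hn : 0 < arr.length) (m : Nat) (hm : m ≤ arr.length) :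
    ((PySem.List.pyRange 0 (m : Int) 1).foldl (altBody arr) (List.replicate (arr.length + 1) 0)).length
        = arr.length + 1 ∧
    ∀ t : Nat,
      ((PySem.List.pyRange 0 (m : Int) 1).foldl (altBody arr) (List.replicate (arr.length + 1) 0)).getD t 0
        = ∑ k ∈ Finset.range m, deltaB arr k t := by
  induction m with
  | zero =>
    rw [PySem.List.pyRange_one_eq_nil (by omega)]
    refine ⟨by simp, fun t => ?_⟩
    rw [Finset.sum_range_zero, List.foldl_nil]
    by_cases ht : t < arr.length + 1
    · rw [List.getD_replicate _ (by simpa using ht)]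
    · rw [List.getD_eq_default _ _ (by simp; omega)]
  | succ m ih =>
    obtain ⟨ihl, ihg⟩ := ih (by omega)
    have hc : ((m + 1 : Nat) : Int) = (m : Int) + 1 := by push_cast; ring
    rw [hc, PySem.List.pyRange_one_succ_right (by omega), List.foldl_append]
    simp only [List.foldl_cons, List.foldl_nil]
    obtain ⟨sl, sg⟩ := stepUpd arr _ m hn (by omega) ihl
    exact ⟨sl, fun t => by rw [sg t, ihg t, Finset.sum_range_succ]⟩

set_option maxHeartbeats 1000000 in
lemma prefDelta (arr : List Int) (hn : 0 < arr.length) (k : Nat) (hk : k < arr.length)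
    (i : Nat) (hi : i < arr.length) :
    ∑ t ∈ Finset.range (i + 1), deltaB arr k t = indKf arr k (i : Int) := by
  have hN : (0 : Int) < (arr.length : Int) := by exact_mod_cast hn
  have hkN : (k : Int) < (arr.length : Int) := by exact_mod_cast hk
  have hiN : (i : Int) < (arr.length : Int) := by exact_mod_cast hi
  have hip : ((i + 1 : Nat) : Int) = (i : Int) + 1 := by push_cast; ring
  unfold deltaB indKf
  dsimp only
  by_cases h1 : arr.getD k 0 ≤ 0
  · simp only [if_pos h1]
    rw [Finset.sum_add_distrib, sum_ind, sum_ind, hip]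
    rcases (by omega : (i : Int) ≤ (k : Int) ∨ (k : Int) < (i : Int)) with hik | hik
    · rw [hmod _ _ hN (by omega) (by omega), if_neg (by omega : ¬ (k : Int) - i = arr.length),
          if_pos (by omega : (0:Int) ≤ (k : Int) - i)]
      split_ifs <;> omega
    · rw [hmod _ _ hN (by omega) (by omega), if_neg (by omega : ¬ (k : Int) - i = arr.length),
          if_neg (by omega : ¬ (0:Int) ≤ (k : Int) - i)]
      split_ifs <;> omega
  · simp only [if_neg h1]
    by_cases h2 : arr.getD k 0 < (arr.length : Int)
    · simp only [if_pos h2]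
      have e1 : PySem.Int.mod ((k : Int) + 1) (arr.length : Int)
          = if (k : Int) + 1 = (arr.length : Int) then 0 else (k : Int) + 1 := by
        rw [hmod _ _ hN (by omega) (by omega)]
        split_ifs <;> omega
      have e2 : PySem.Int.mod ((k : Int) - arr.getD k 0) (arr.length : Int)
          = if arr.getD k 0 ≤ (k : Int) then (k : Int) - arr.getD k 0
            else (k : Int) - arr.getD k 0 + arr.length := by
        rw [hmod _ _ hN (by omega) (by omega)]
        split_ifs <;> omega
      have e3 : PySem.Int.mod ((k : Int) - (i : Int)) (arr.length : Int)
          = if (i : Int) ≤ (k : Int) then (k : Int) - i else (k : Int) - i + arr.length := by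
        rw [hmod _ _ hN (by omega) (by omega)]
        split_ifs <;> omega
      by_cases h3 : PySem.Int.mod ((k : Int) + 1) (arr.length : Int)
          ≤ PySem.Int.mod ((k : Int) - arr.getD k 0) (arr.length : Int)
      · simp only [if_pos h3]
        rw [Finset.sum_add_distrib, sum_ind, sum_ind, hip, e1, e2, e3]
        rw [e1, e2] at h3
        split_ifs at * <;> omega
      · simp only [if_neg h3]
        rw [Finset.sum_add_distrib, Finset.sum_add_distrib, Finset.sum_add_distrib,
            sum_ind, sum_ind, sum_ind, sum_ind, hip, e1, e2, e3]
        rw [e1, e2] at h3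
        split_ifs at * <;> omega
    · simp only [if_neg h2]
      rw [Finset.sum_const_zero]
      have e3 : PySem.Int.mod ((k : Int) - (i : Int)) (arr.length : Int)
          = if (i : Int) ≤ (k : Int) then (k : Int) - i else (k : Int) - i + arr.length := by
        rw [hmod _ _ hN (by omega) (by omega)]
        split_ifs <;> omega
      rw [e3]
      split_ifs <;> omega

-- (i + j) mod n, then subtract i and mod again: gives back j   (0 ≤ i,j < n)
lemma sigma_tau (arr : List Int) (hn : 0 < arr.length) (i : Int) (h0 : 0 ≤ i)
    (hiN : i < arr.length) (j : Nat) (hj : j < arr.length) :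
    PySem.Int.mod (PySem.Int.mod (i + (j : Int)) (arr.length : Int) - i) (arr.length : Int)
      = (j : Int) := by
  have hN : (0 : Int) < (arr.length : Int) := by exact_mod_cast hn
  have hjN : (j : Int) < (arr.length : Int) := by exact_mod_cast hj
  rcases (by omega : i + (j : Int) < (arr.length : Int) ∨ (arr.length : Int) ≤ i + (j : Int))
    with hc | hc
  · have e : PySem.Int.mod (i + (j : Int)) (arr.length : Int) = i + (j : Int) := by
      rw [PySem.Int.mod_eq_emod_of_pos hN, Int.emod_eq_of_lt (by omega) hc]
    rw [e]
    have hx : i + (j : Int) - i = (j : Int) := by ring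
    rw [hx, PySem.Int.mod_eq_emod_of_pos hN, Int.emod_eq_of_lt (by omega) hjN]
  · have e : PySem.Int.mod (i + (j : Int)) (arr.length : Int)
        = i + (j : Int) - arr.length := by
      rw [hmod2 (i + (j : Int)) _ hN (by omega) (by omega), if_neg (by omega)]
    rw [e]
    have hx : i + (j : Int) - (arr.length : Int) - i = (j : Int) - arr.length := by ring
    rw [hx, hmod ((j : Int) - (arr.length : Int)) _ hN (by omega) (by omega)]
    split_ifs <;> omega

-- (k - i) mod n, then add i and mod again: gives back k   (0 ≤ i,k < n)
lemma tau_sigma (arr : List Int) (hn : 0 < arr.length) (i : Int) (h0 : 0 ≤ i)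
    (hiN : i < arr.length) (k : Nat) (hk : k < arr.length) :
    PySem.Int.mod (i + ((PySem.Int.mod ((k : Int) - i) (arr.length : Int)).toNat : Int))
      (arr.length : Int) = (k : Int) := by
  have hN : (0 : Int) < (arr.length : Int) := by exact_mod_cast hn
  have hkN : (k : Int) < (arr.length : Int) := by exact_mod_cast hk
  have h0m : 0 ≤ PySem.Int.mod ((k : Int) - i) (arr.length : Int) := by
    rw [PySem.Int.mod_eq_emod_of_pos hN]; exact Int.emod_nonneg _ (by omega)
  rw [Int.toNat_of_nonneg h0m]
  rcases (by omega : 0 ≤ (k : Int) - i ∨ (k : Int) - i < 0) with hc | hc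
  · have e : PySem.Int.mod ((k : Int) - i) (arr.length : Int) = (k : Int) - i := by
      rw [hmod ((k : Int) - i) _ hN (by omega) (by omega)]
      split_ifs <;> omega
    rw [e]
    have hx : i + ((k : Int) - i) = (k : Int) := by ring
    rw [hx, PySem.Int.mod_eq_emod_of_pos hN, Int.emod_eq_of_lt (by omega) hkN]
  · have e : PySem.Int.mod ((k : Int) - i) (arr.length : Int)
        = (k : Int) - i + arr.length := by
      rw [hmod ((k : Int) - i) _ hN (by omega) (by omega)]
      split_ifs <;> omega
    rw [e]
    have hx : i + ((k : Int) - i + (arr.length : Int)) = (k : Int) + arr.length := by ring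
    rw [hx, hmod2 ((k : Int) + (arr.length : Int)) _ hN (by omega) (by omega),
        if_neg (by omega)]
    ring

set_option maxHeartbeats 1000000 in
lemma acfEq (arr : List Int) (hn : 0 < arr.length) (i : Int) (h0 : 0 ≤ i)
    (hiN : i < arr.length) :
    AcF arr i = ∑ k ∈ Finset.range arr.length, indKf arr k i := by
  have hN : (0 : Int) < (arr.length : Int) := by exact_mod_cast hn
  unfold AcF
  refine Finset.sum_nbij'
    (fun j => (PySem.Int.mod (i + (j : Int)) (arr.length : Int)).toNat)
    (fun k => (PySem.Int.mod ((k : Int) - i) (arr.length : Int)).toNat)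
    ?_ ?_ ?_ ?_ ?_
  · intro j hj
    rw [Finset.mem_range] at *
    dsimp only
    have h1 : 0 ≤ PySem.Int.mod (i + (j : Int)) (arr.length : Int) := by
      rw [PySem.Int.mod_eq_emod_of_pos hN]; exact Int.emod_nonneg _ (by omega)
    have h2 : PySem.Int.mod (i + (j : Int)) (arr.length : Int) < (arr.length : Int) := by
      rw [PySem.Int.mod_eq_emod_of_pos hN]; exact Int.emod_lt_of_pos _ hN
    omega
  · intro k hk
    rw [Finset.mem_range] at *
    dsimp only
    have h1 : 0 ≤ PySem.Int.mod ((k : Int) - i) (arr.length : Int) := by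
      rw [PySem.Int.mod_eq_emod_of_pos hN]; exact Int.emod_nonneg _ (by omega)
    have h2 : PySem.Int.mod ((k : Int) - i) (arr.length : Int) < (arr.length : Int) := by
      rw [PySem.Int.mod_eq_emod_of_pos hN]; exact Int.emod_lt_of_pos _ hN
    omega
  · intro j hj
    rw [Finset.mem_range] at hj
    dsimp only
    have h1 : 0 ≤ PySem.Int.mod (i + (j : Int)) (arr.length : Int) := by
      rw [PySem.Int.mod_eq_emod_of_pos hN]; exact Int.emod_nonneg _ (by omega)
    have h2 := sigma_tau arr hn i h0 hiN j hj
    rw [Int.toNat_of_nonneg h1, h2]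
    omega
  · intro k hk
    rw [Finset.mem_range] at hk
    dsimp only
    have h2 := tau_sigma arr hn i h0 hiN k hk
    rw [h2]
    omega
  · intro j hj
    rw [Finset.mem_range] at hj
    dsimp only
    unfold indAf indKf
    have h1 : 0 ≤ PySem.Int.mod (i + (j : Int)) (arr.length : Int) := by
      rw [PySem.Int.mod_eq_emod_of_pos hN]; exact Int.emod_nonneg _ (by omega)
    rw [pyGetD_toNat _ _ h1, Int.toNat_of_nonneg h1, sigma_tau arr hn i h0 hiN j hj]

lemma innerB (DL : List Int) (m : Nat) :
    (PySem.List.pyRange 0 (m : Int) 1).foldl (altScanBody DL) (0, 0)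
      = ((PySem.List.pyRange 0 (m : Int) 1).foldl (fun M i => max M (PrefI DL i)) 0,
         ∑ t ∈ Finset.range m, DL.getD t 0) := by
  induction m with
  | zero =>
    rw [PySem.List.pyRange_one_eq_nil (by omega)]
    simp
  | succ m ih =>
    have hc : ((m + 1 : Nat) : Int) = (m : Int) + 1 := by push_cast; ring
    rw [hc, PySem.List.pyRange_one_succ_right (by omega), List.foldl_append, List.foldl_append, ih]
    simp only [List.foldl_cons, List.foldl_nil]
    unfold altScanBody
    dsimp only
    have hcur : (∑ t ∈ Finset.range m, DL.getD t 0) + PySem.List.pyGetD DL (m : Int) 0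
        = PrefI DL (m : Int) := by
      rw [PySem.List.pyGetD_natCast, PrefI]
      simp [Finset.sum_range_succ]
    rw [hcur]
    simp only [Prod.mk.injEq]
    constructor
    · rw [max_def]; split_ifs <;> omega
    · rfl

-- ===== VERDICT (by name: the statement is the Claim_ definition above) =====

theorem getAmazingNumberNaive_spec : Claim_equal_getAmazingNumberNaive := by
  unfold Claim_equal_getAmazingNumberNaive
  intro arr _
  unfold Spec_getAmazingNumberNaive
  by_cases hz : arr.length = 0
  · have he : arr = [] := by cases arr <;> simp_all
    subst he; decide
  · have hn : 0 < arr.length := Nat.pos_of_ne_zero hz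
    have hN : ((arr.length : Int)) ≠ 0 := by exact_mod_cast hz
    rw [portA_eq]
    unfold getAmazingNumberNaive_alt
    dsimp only
    rw [if_neg hN, innerB]
    dsimp only
    refine (PySem.List.foldl_congr_mem _ _ _ _ ?_).symm
    intro acc i hi
    obtain ⟨h0, hiN⟩ := PySem.List.mem_pyRange_one.mp hi
    obtain ⟨_, hg⟩ := diffInv arr hn arr.length (le_refl _)
    have hkey : PrefI ((PySem.List.pyRange 0 ((arr.length : Int)) 1).foldl (altBody arr)
        (List.replicate (arr.length + 1) 0)) i = AcF arr i := by
      unfold PrefI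
      calc
        ∑ t ∈ Finset.range (i.toNat + 1),
            ((PySem.List.pyRange 0 ((arr.length : Int)) 1).foldl (altBody arr)
              (List.replicate (arr.length + 1) 0)).getD t 0
            = ∑ t ∈ Finset.range (i.toNat + 1), ∑ k ∈ Finset.range arr.length, deltaB arr k t := by
              exact Finset.sum_congr rfl (fun t _ => hg t)
        _ = ∑ k ∈ Finset.range arr.length, ∑ t ∈ Finset.range (i.toNat + 1), deltaB arr k t :=
              Finset.sum_comm
        _ = ∑ k ∈ Finset.range arr.length, indKf arr k ((i.toNat : Nat) : Int) := by
              refine Finset.sum_congr rfl (fun k hk => ?_)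
              exact prefDelta arr hn k (Finset.mem_range.mp hk) i.toNat (by omega)
        _ = ∑ k ∈ Finset.range arr.length, indKf arr k i := by
              rw [Int.toNat_of_nonneg h0]
        _ = AcF arr i := (acfEq arr hn i h0 hiN).symm
    rw [hkey]
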